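-- pv_equiv track=rewrite | github.com/thinkingatoms/epub_translator | epubtrans.py | _unchunk_trans
-- ===== SOURCE A (Python) =====
-- from typing import List, Set, Tuple, Dict
--
-- def _unchunk_trans(trans: List[Tuple[Tuple[int, int, str], str]]) -> Dict[str, str]:
--     trans = sorted(trans)
--     texts = {}
--     for (text_id, line_id, orig), tran in trans:
--         if text_id not in texts:
--             texts[text_id] = orig, []
--         texts[text_id][1].append((line_id, tran))
--     ret = {}
--     for orig, trans in texts.values():
--         trans = ' '.join([tran for line_id, tran in sorted(trans)])
--         ret[orig] = trans
--     return ret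
-- ===== SOURCE B (Python) =====
-- from typing import List, Tuple, Dict
--
-- def _unchunk_trans(trans: List[Tuple[Tuple[int, int, str], str]]) -> Dict[str, str]:
--     ret = {}
--     for tid in sorted({text_id for (text_id, _, _), _ in trans}):
--         lines = [(l, o, t) for (t_id, l, o), t in trans if t_id == tid]
--         orig = min((l, o) for l, o, _ in lines)[1]
--         ret[orig] = ' '.join(t for _, t in sorted((l, t) for l, _, t in lines))
--     return ret
-- ===== Notes on version B (the rewrite author's own statement) =====
-- stated objective: alternative
-- what changed: B drops A's global sort and grouping dict: it iterates over the sorted set of text ids and, per id, collects that id's lines with a comprehension over the raw input, takes orig from a tuple-min and sorts only the group's (line_id, tran) pairs.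
import Mathlib
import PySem

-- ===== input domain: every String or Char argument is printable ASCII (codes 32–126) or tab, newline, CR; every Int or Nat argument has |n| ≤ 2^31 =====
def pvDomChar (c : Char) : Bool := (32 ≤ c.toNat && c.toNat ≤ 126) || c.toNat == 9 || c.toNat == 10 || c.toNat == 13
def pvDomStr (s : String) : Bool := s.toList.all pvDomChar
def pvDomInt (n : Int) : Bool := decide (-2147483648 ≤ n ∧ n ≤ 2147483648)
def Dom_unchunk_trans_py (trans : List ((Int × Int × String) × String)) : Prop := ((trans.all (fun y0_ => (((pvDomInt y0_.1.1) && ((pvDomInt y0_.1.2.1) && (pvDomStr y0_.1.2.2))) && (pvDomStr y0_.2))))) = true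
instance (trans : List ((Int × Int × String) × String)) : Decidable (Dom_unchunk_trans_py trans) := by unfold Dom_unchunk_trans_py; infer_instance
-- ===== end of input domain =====

-- B replaces A's global sort + grouping dict with: the sorted set of text ids, and per id a
-- comprehension over the raw input plus a tuple-min for orig (objective: alternative decomposition).

-- ===== PORT A =====
-- Python compares tuples lexicographically: the sort key of ((text_id, line_id, orig), tran)
-- is the lexicographic order on the 4 components, expressed with Mathlib's Prod.Lex (exact:
-- Lean's < on Int and on String agree with Python's on these values).
def pvKey4 (x : (Int × Int × String) × String) : Int ×ₗ (Int ×ₗ (String ×ₗ String)) :=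
  toLex (x.1.1, toLex (x.1.2.1, toLex (x.1.2.2, x.2)))

-- the body of A's first loop: `if text_id not in texts: texts[text_id] = orig, []` followed by
-- `texts[text_id][1].append((line_id, tran))` (in-place append = Dict.modify)
def pvStepA (texts : PySem.Dict Int (String × List (Int × String)))
    (x : (Int × Int × String) × String) : PySem.Dict Int (String × List (Int × String)) :=
  let texts := if texts.contains x.1.1 then texts else texts.insert x.1.1 (x.1.2.2, [])
  texts.modify x.1.1 ("", []) (fun p => (p.1, p.2 ++ [(x.1.2.1, x.2)]))

def unchunk_trans_py (trans : List ((Int × Int × String) × String)) : List (String × String) :=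
  let ts := PySem.List.sorted trans pvKey4       -- trans = sorted(trans)
  let texts := ts.foldl pvStepA ⟨[]⟩
  let ret : PySem.Dict String String :=
    texts.values.foldl (fun ret p =>
      ret.insert p.1
        (PySem.Str.join " " ((PySem.List.sorted p.2 (fun q => toLex q)).map Prod.snd))) ⟨[]⟩
  ret.items

-- ===== PORT B =====
def unchunk_trans_py_alt (trans : List ((Int × Int × String) × String)) : List (String × String) :=
  let tids := PySem.List.sorted (PySem.Set.ofList (trans.map (fun x => x.1.1))) (fun t => t)
  (tids.foldl (fun (ret : PySem.Dict String String) tid =>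
    let lines := trans.filterMap (fun x =>
      if x.1.1 == tid then some (x.1.2.1, x.1.2.2, x.2) else none)
    -- min((l, o) …): Python's tuple min = first lexicographic minimum; the group is nonempty
    -- (tid came from the set of text ids), so the `getD` default is never used
    let orig := ((PySem.List.min? (lines.map (fun y => (y.1, y.2.1)))
                    (fun p => toLex p)).getD (0, "")).2
    ret.insert orig
      (PySem.Str.join " "
        ((PySem.List.sorted (lines.map (fun y => (y.1, y.2.2))) (fun q => toLex q)).map
          Prod.snd))) ⟨[]⟩).items

-- ===== PRECONDITION & SPEC =====
def Spec_unchunk_trans_py (trans : List ((Int × Int × String) × String)) (out : List (String × String)) : Prop := out = unchunk_trans_py_alt trans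
instance (trans : List ((Int × Int × String) × String)) (out : List (String × String)) : Decidable (Spec_unchunk_trans_py trans out) := by unfold Spec_unchunk_trans_py; infer_instance

-- ===== CLAIM (what is proved, stated in full; the proofs are below) =====
def Claim_equal_unchunk_trans_py : Prop := ∀ (trans : List ((Int × Int × String) × String)), Dom_unchunk_trans_py trans → Spec_unchunk_trans_py trans (unchunk_trans_py trans)

-- ===== LEMMAS AND PROOFS =====

-- the entry A's first dict holds for text id t after scanning ts: (orig of first element with
-- this text id, the (line_id, tran) pairs of all of them, in scan order)
def pvG (ts : List ((Int × Int × String) × String)) (t : Int) : String × List (Int × String) :=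
  (((ts.find? (fun x => x.1.1 == t)).map (fun x => x.1.2.2)).getD "",
   (ts.filter (fun x => x.1.1 == t)).map (fun x => (x.1.2.1, x.2)))

lemma pv_ofList_append_singleton {α : Type} [BEq α] [LawfulBEq α] (l : List α) (a : α) :
    PySem.Set.ofList (l ++ [a]) =
      if a ∈ PySem.Set.ofList l then PySem.Set.ofList l else PySem.Set.ofList l ++ [a] := by
  simp [PySem.Set.ofList, List.foldl_append, PySem.Set.add, PySem.Set]

lemma pv_ofList_sublist {α : Type} [BEq α] [LawfulBEq α] (l : List α) :
    (PySem.Set.ofList l).Sublist l := by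
  induction l using List.reverseRecOn with
  | nil => simp [PySem.Set.ofList, PySem.Set.empty]
  | append_singleton l a ih =>
      rw [pv_ofList_append_singleton]
      split
      · exact ih.trans (List.sublist_append_left _ _)
      · exact List.Sublist.append ih (List.Sublist.refl _)

lemma pv_find?_map_keyed {ν : Type} (L : List Int) (F : Int → ν) (t : Int) :
    List.find? (fun p => p.1 == t) (L.map (fun u => (u, F u))) =
      (L.find? (· == t)).map (fun u => (u, F u)) := by
  induction L with
  | nil => rfl
  | cons a l ih =>
      by_cases h : a = t
      · subst h; simp
      · simp only [List.map_cons, List.find?_cons]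
        have hb : (a == t) = false := by simp [h]
        simp [hb, ih]

lemma pv_find?_beq_self (L : List Int) (t : Int) (h : t ∈ L) : L.find? (· == t) = some t := by
  induction L with
  | nil => cases h
  | cons a l ih =>
      by_cases ha : a = t
      · subst ha; simp
      · have hb : (a == t) = false := by simp [ha]
        have : t ∈ l := by cases h with | head => exact absurd rfl ha | tail _ h => exact h
        simp [hb, ih this]

lemma pv_find?_beq_none (L : List Int) (t : Int) (h : t ∉ L) : L.find? (· == t) = none := by
  rw [List.find?_eq_none]
  intro x hx hbx
  exact h (by simpa using (by simpa using hbx : x = t) ▸ hx)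

-- pvG after appending one element, for the other keys
lemma pvG_append_ne (ts : List ((Int × Int × String) × String))
    (x : (Int × Int × String) × String) (u : Int) (h : x.1.1 ≠ u) :
    pvG (ts ++ [x]) u = pvG ts u := by
  have hb : (x.1.1 == u) = false := by simp [h]
  unfold pvG
  rw [List.find?_append, List.filter_append]
  simp [hb]

-- pvG after appending an element whose text id was already seen
lemma pvG_append_self_mem (ts : List ((Int × Int × String) × String))
    (x : (Int × Int × String) × String) (h : x.1.1 ∈ ts.map (fun y => y.1.1)) :
    pvG (ts ++ [x]) x.1.1 = ((pvG ts x.1.1).1, (pvG ts x.1.1).2 ++ [(x.1.2.1, x.2)]) := by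
  have hfind : ts.find? (fun y => y.1.1 == x.1.1) ≠ none := by
    rw [Ne, List.find?_eq_none]
    intro hall
    rcases List.mem_map.mp h with ⟨z, hz, hzt⟩
    exact absurd (by simp [hzt]) (hall z hz)
  rcases Option.ne_none_iff_exists'.mp hfind with ⟨v, hv⟩
  unfold pvG
  rw [List.find?_append, List.filter_append, hv]
  simp

-- pvG after appending an element with a fresh text id
lemma pvG_append_self_notmem (ts : List ((Int × Int × String) × String))
    (x : (Int × Int × String) × String) (h : x.1.1 ∉ ts.map (fun y => y.1.1)) :
    pvG (ts ++ [x]) x.1.1 = (x.1.2.2, [(x.1.2.1, x.2)]) := by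
  have hfind : ts.find? (fun y => y.1.1 == x.1.1) = none := by
    rw [List.find?_eq_none]
    intro y hy hby
    exact h (List.mem_map.mpr ⟨y, hy, by simpa using hby⟩)
  have hfilter : ts.filter (fun y => y.1.1 == x.1.1) = [] := by
    rw [List.filter_eq_nil_iff]
    intro y hy hby
    exact h (List.mem_map.mpr ⟨y, hy, by simpa using hby⟩)
  unfold pvG
  rw [List.find?_append, List.filter_append, hfind, hfilter]
  simp

-- characterization of A's first loop over ANY list ts
lemma pv_buildTexts (ts : List ((Int × Int × String) × String)) :
    ts.foldl pvStepA ⟨[]⟩ =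
      ⟨(PySem.List.dedup (ts.map (fun x => x.1.1))).map (fun t => (t, pvG ts t))⟩ := by
  induction ts using List.reverseRecOn with
  | nil => rfl
  | append_singleton ts x ih =>
      rw [List.foldl_append, List.foldl_cons, List.foldl_nil, ih]
      set L := PySem.List.dedup (ts.map (fun x => x.1.1)) with hL
      have hdedup : PySem.List.dedup ((ts ++ [x]).map (fun x => x.1.1)) =
          if x.1.1 ∈ L then L else L ++ [x.1.1] := by
        simp only [PySem.List.dedup, List.map_append, List.map_cons, List.map_nil]
        exact pv_ofList_append_singleton _ _
      have hmemL : x.1.1 ∈ L ↔ x.1.1 ∈ ts.map (fun x => x.1.1) := by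
        simp [hL, PySem.List.dedup, PySem.Set.mem_ofList]
      have hany : ∀ b : Bool, decide (x.1.1 ∈ L) = b →
          ((L.map (fun t => (t, pvG ts t))).any (fun p => p.1 == x.1.1)) = b := by
        intro b hb
        rw [List.any_map, ← hb, Bool.eq_iff_iff]
        simp [Function.comp, List.any_eq_true]
      by_cases hmem : x.1.1 ∈ L
      · -- key already present: no insert, modify replaces the entry in place
        have hc := hany true (by simp [hmem])
        have hfind : List.find? (fun p => p.1 == x.1.1) (L.map (fun t => (t, pvG ts t)))
            = some (x.1.1, pvG ts x.1.1) := by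
          rw [pv_find?_map_keyed, pv_find?_beq_self L _ hmem]; rfl
        simp only [pvStepA, PySem.Dict.modify, PySem.Dict.insert, PySem.Dict.contains, hc,
          if_true, PySem.Dict.getD, PySem.Dict.get?, hfind, Option.map_some, Option.getD_some,
          hdedup, hmem, if_true]
        congr 1
        rw [List.map_map]
        apply List.map_congr_left
        intro u hu
        by_cases hut : u = x.1.1
        · have hb : (u == x.1.1) = true := by simp [hut]
          simp only [Function.comp_apply, hb, if_true]
          rw [hut, pvG_append_self_mem ts x (hmemL.mp hmem)]
        · have hb : (u == x.1.1) = false := by simp [hut]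
          simp only [Function.comp_apply, hb, Bool.false_eq_true, if_false]
          rw [pvG_append_ne ts x u (fun h => hut h.symm)]
      · -- new key: insert appends (orig, []), modify then replaces that last entry
        have hc := hany false (by simp [hmem])
        have hc2 : ((L.map (fun t => (t, pvG ts t)) ++ [(x.1.1, ((x.1.2.2 : String),
            ([] : List (Int × String))))]).any (fun p => p.1 == x.1.1)) = true := by simp
        have hfindn : List.find? (fun p => p.1 == x.1.1) (L.map (fun t => (t, pvG ts t)))
            = none := by
          rw [pv_find?_map_keyed, pv_find?_beq_none L _ hmem]; rfl
        simp only [pvStepA, PySem.Dict.insert, PySem.Dict.contains, hc, Bool.false_eq_true,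
          if_false, PySem.Dict.modify, PySem.Dict.getD, PySem.Dict.get?, hc2, if_true,
          List.find?_append, hfindn, Option.none_or, List.find?_cons, beq_self_eq_true,
          if_true, hdedup, hmem, Option.map_some, Option.getD_some]
        rw [List.map_append, List.map_append]
        congr 1
        refine congrArg₂ (fun a b : List (Int × String × List (Int × String)) => a ++ b) ?_ ?_
        · rw [List.map_map]
          apply List.map_congr_left
          intro u hu
          have hut : u ≠ x.1.1 := fun h => hmem (h ▸ hu)
          have hb : (u == x.1.1) = false := by simp [hut]
          simp only [Function.comp_apply, hb, Bool.false_eq_true, if_false]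
          rw [pvG_append_ne ts x u (fun h => hut h.symm)]
        · simp only [List.map_cons, List.map_nil, beq_self_eq_true, if_true]
          rw [pvG_append_self_notmem ts x (fun h => hmem (hmemL.mpr h))]
          simp

lemma pv_filterMap_guard (l : List ((Int × Int × String) × String)) (t : Int) :
    l.filterMap (fun x => if x.1.1 == t then some (x.1.2.1, x.1.2.2, x.2) else none)
      = (l.filter (fun x => x.1.1 == t)).map (fun x => (x.1.2.1, x.1.2.2, x.2)) := by
  induction l with
  | nil => rfl
  | cons a l ih =>
      by_cases h : a.1.1 = t
      · simp only [List.filterMap_cons, List.filter_cons, h, beq_self_eq_true, if_true,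
          List.map_cons]
        exact congrArg _ ih
      · have hb : (a.1.1 == t) = false := by simp [h]
        simp only [List.filterMap_cons, List.filter_cons, hb, Bool.false_eq_true, if_false]
        exact ih

lemma pv_min?_foldl_some_ne_none {α κ : Type} [LT κ] [DecidableLT κ] (key : α → κ)
    (l : List α) (m : α) :
    (l.foldl (fun acc x =>
        match acc with
        | none => some x
        | some m => if key x < key m then some x else some m) (some m)) ≠ none := by
  induction l generalizing m with
  | nil => simp
  | cons b l ih =>
      simp only [List.foldl_cons]
      by_cases h : key b < key m
      · simpa [h] using ih b
      · simpa [h] using ih m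

lemma pv_min?_eq_none_iff {α κ : Type} [LT κ] [DecidableLT κ] (xs : List α) (key : α → κ) :
    PySem.List.min? xs key = none ↔ xs = [] := by
  constructor
  · intro h
    cases xs with
    | nil => rfl
    | cons a l =>
        exact absurd (by simpa [PySem.List.min?] using h)
          (pv_min?_foldl_some_ne_none key l a)
  · intro h; subst h; rfl

-- ===== the main equivalence =====

theorem pv_main (trans : List ((Int × Int × String) × String)) :
    unchunk_trans_py trans = unchunk_trans_py_alt trans := by
  classical
  set S := PySem.List.sorted trans pvKey4 with hS
  have hSperm : S.Perm trans := PySem.List.sorted_perm trans pvKey4 false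
  have hSpair : S.Pairwise (fun a b => pvKey4 a ≤ pvKey4 b) := PySem.List.sorted_pairwise trans pvKey4
  -- text ids of S are weakly increasing
  have hTidPair : (S.map (fun x => x.1.1)).Pairwise (· ≤ ·) := by
    refine List.Pairwise.map _ (fun a b hab => ?_) hSpair
    rcases Prod.Lex.toLex_le_toLex.mp hab with h | ⟨h, _⟩
    · exact le_of_lt h
    · exact le_of_eq h
  set L := PySem.List.dedup (S.map (fun x => x.1.1)) with hLdef
  set tids := PySem.List.sorted (PySem.Set.ofList (trans.map (fun x => x.1.1))) (fun t => t)
    with htids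
  -- Step 2: the dedup of the sorted scan IS the sorted set of text ids
  have hLpairlt : L.Pairwise (· < ·) := by
    have hsub : L.Sublist (S.map (fun x => x.1.1)) := pv_ofList_sublist _
    have hle : L.Pairwise (· ≤ ·) := hTidPair.sublist hsub
    have hnd : L.Nodup := PySem.Set.nodup_ofList _
    exact (hnd.and hle).imp (fun h => lt_of_le_of_ne h.2 h.1)
  have hLperm : L.Perm (PySem.Set.ofList (trans.map (fun x => x.1.1))) := by
    refine (List.perm_ext_iff_of_nodup ?_ ?_).mpr ?_
    · exact PySem.Set.nodup_ofList _
    · exact PySem.Set.nodup_ofList _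
    intro a
    rw [hLdef]
    simp only [PySem.List.dedup, PySem.Set.mem_ofList]
    exact (hSperm.map _).mem_iff
  have hLtids : tids = L :=
    PySem.List.sorted_eq_of_perm_of_pairwise_lt _ _ _ hLperm hLpairlt
  -- unfold both sides to folds over the same id list
  show (((S.foldl pvStepA ⟨[]⟩).values).foldl _ ⟨[]⟩ : PySem.Dict String String).items = _
  rw [pv_buildTexts S]
  show ((((L.map (fun t => (t, pvG S t))).map Prod.snd).foldl _ ⟨[]⟩ :
      PySem.Dict String String).items) = _
  rw [List.map_map, List.foldl_map]
  show _ = ((tids.foldl _ ⟨[]⟩ : PySem.Dict String String).items)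
  rw [hLtids]
  congr 1
  apply PySem.List.foldl_congr_mem
  intro acc t ht
  -- per-group facts
  have htmem : t ∈ trans.map (fun x => x.1.1) := by
    have : t ∈ PySem.Set.ofList (trans.map (fun x => x.1.1)) := by
      have := hLperm.mem_iff.mp ht; exact this
    exact (PySem.Set.mem_ofList _ _).mp this
  set fT := trans.filter (fun x => x.1.1 == t) with hfT
  have hgperm : (S.filter (fun x => x.1.1 == t)).Perm fT := hSperm.filter _
  have hlines : trans.filterMap (fun x =>
      if x.1.1 == t then some (x.1.2.1, x.1.2.2, x.2) else none)
      = fT.map (fun x => (x.1.2.1, x.1.2.2, x.2)) :=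
    pv_filterMap_guard trans t
  -- the group under S, nonempty, with sorted keys
  have hfTne : fT ≠ [] := by
    rcases List.mem_map.mp htmem with ⟨z, hz, hzt⟩
    intro hnil
    have : z ∈ fT := List.mem_filter.mpr ⟨hz, by simp [hzt]⟩
    simp [hnil] at this
  obtain ⟨h0, rest, hgS⟩ : ∃ h0 rest, S.filter (fun x => x.1.1 == t) = h0 :: rest := by
    cases hg : S.filter (fun x => x.1.1 == t) with
    | nil =>
        refine absurd ?_ hfTne
        rw [hg] at hgperm
        exact hgperm.symm.eq_nil
    | cons a l => exact ⟨a, l, rfl⟩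
  have hh0S : h0 ∈ S.filter (fun x => x.1.1 == t) := by rw [hgS]; exact List.mem_cons_self
  have hh0t : h0.1.1 = t := by simpa using (List.mem_filter.mp hh0S).2
  have hh0min : ∀ y ∈ S.filter (fun x => x.1.1 == t), pvKey4 h0 ≤ pvKey4 y := by
    intro y hy
    have hp : (S.filter (fun x => x.1.1 == t)).Pairwise (fun a b => pvKey4 a ≤ pvKey4 b) :=
      hSpair.sublist (List.filter_sublist)
    rw [hgS] at hp hy
    cases hy with
    | head => exact le_refl _
    | tail _ hy => exact (List.pairwise_cons.mp hp).1 y hy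
  -- A's stored orig is h0's orig
  have hfindS : S.find? (fun x => x.1.1 == t) = some h0 := by
    rw [← List.head?_filter, hgS]; rfl
  -- B's min over the (line_id, orig) pairs
  set pairsLO := (fT.map (fun x => (x.1.2.1, x.1.2.2, x.2))).map (fun y => (y.1, y.2.1))
    with hpairs
  have hpairs' : pairsLO = fT.map (fun x => (x.1.2.1, x.1.2.2)) := by
    rw [hpairs, List.map_map]; rfl
  obtain ⟨m, hm⟩ : ∃ m, PySem.List.min? pairsLO (fun p => toLex p) = some m := by
    cases hmin : PySem.List.min? pairsLO (fun p => toLex p) with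
    | none =>
        exfalso
        have := (pv_min?_eq_none_iff _ _).mp hmin
        rw [hpairs'] at this
        exact hfTne (List.map_eq_nil_iff.mp this)
    | some m => exact ⟨m, rfl⟩
  have hmmem : m ∈ pairsLO := PySem.List.min?_mem hm
  have hmin : ∀ y ∈ pairsLO, toLex m ≤ toLex y := PySem.List.min?_isMin hm
  -- the two chosen (line_id, orig) pairs coincide
  have hpair_eq : (h0.1.2.1, h0.1.2.2) = m := by
    have h1 : toLex m ≤ toLex (h0.1.2.1, h0.1.2.2) := by
      apply hmin
      rw [hpairs']
      exact List.mem_map.mpr ⟨h0, hgperm.mem_iff.mp hh0S, rfl⟩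
    have h2 : toLex (h0.1.2.1, h0.1.2.2) ≤ toLex m := by
      rw [hpairs'] at hmmem
      rcases List.mem_map.mp hmmem with ⟨z, hz, hzm⟩
      have hzS : z ∈ S.filter (fun x => x.1.1 == t) := hgperm.mem_iff.mpr hz
      have hzt : z.1.1 = t := by simpa using (List.mem_filter.mp hzS).2
      have hk := hh0min z hzS
      rcases Prod.Lex.toLex_le_toLex.mp hk with h | ⟨_, h⟩
      · exact absurd h (by rw [hh0t, hzt]; exact lt_irrefl t)
      · rcases Prod.Lex.toLex_le_toLex.mp h with h' | ⟨h', h''⟩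
        · rw [← hzm]
          exact Prod.Lex.toLex_le_toLex.mpr (Or.inl h')
        · rcases Prod.Lex.toLex_le_toLex.mp h'' with h3 | ⟨h3, _⟩
          · rw [← hzm]
            exact Prod.Lex.toLex_le_toLex.mpr (Or.inr ⟨h', le_of_lt h3⟩)
          · rw [← hzm]
            exact Prod.Lex.toLex_le_toLex.mpr (Or.inr ⟨h', le_of_eq h3⟩)
    exact toLex.injective (le_antisymm h2 h1)
  -- the (line_id, tran) pair lists of the two sides are permutations with an injective sort key
  have hsorted_eq :
      PySem.List.sorted ((S.filter (fun x => x.1.1 == t)).map (fun x => (x.1.2.1, x.2)))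
          (fun q => toLex q)
        = PySem.List.sorted ((fT.map (fun x => (x.1.2.1, x.1.2.2, x.2))).map
            (fun y => (y.1, y.2.2))) (fun q => toLex q) := by
    have hmapeq : (fT.map (fun x => (x.1.2.1, x.1.2.2, x.2))).map (fun y => (y.1, y.2.2))
        = fT.map (fun x => (x.1.2.1, x.2)) := by
      rw [List.map_map]; rfl
    rw [hmapeq]
    exact PySem.List.sorted_eq_sorted_of_perm _ _ _ toLex.injective (hgperm.map _)
  -- assemble: both loop bodies insert the same key and the same value
  simp only [Function.comp_apply, hlines]
  simp only [pvG, hfindS, Option.map_some, Option.getD_some]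
  rw [hsorted_eq, ← hpairs, hm, Option.getD_some, ← hpair_eq]

-- ===== VERDICT (by name: the statement is the Claim_ definition above) =====
theorem unchunk_trans_py_spec : Claim_equal_unchunk_trans_py := by
  intro trans _
  unfold Spec_unchunk_trans_py
  exact pv_main trans
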